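-- pv_equiv track=rewrite | github.com/Algorithm-Club-KUAL/TA-Algorithm | KJH/이코테/cos_pro_1급/2-10.py | solution
-- ===== SOURCE A (Python) =====
-- def solution(s):
--     s += '#'
--     answer = ""
--     for i in range(len(s)-1):
--         if s[i] == '0' and s[i + 1] != '0':
--             answer += '0'
--         else: #얘가 1일 떄랑 연속으로 0일때
--             if s[i] == '1': #추가한 줄
--                 answer += '1'
--     return answer
-- ===== SOURCE B (Python) =====
-- def solution(s):
--     # Run-based scan: jump over each maximal run of equal characters;
--     # a run of '1's is kept whole, a run of '0's collapses to one '0',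
--     # any other run is dropped. No sentinel, no per-index lookahead.
--     out = []
--     i = 0
--     n = len(s)
--     while i < n:
--         c = s[i]
--         j = i
--         while j < n and s[j] == c:
--             j += 1
--         if c == '1':
--             out.append('1' * (j - i))
--         elif c == '0':
--             out.append('0')
--         i = j
--     return ''.join(out)
-- ===== Notes on version B (the rewrite author's own statement) =====
-- stated objective: alternative
-- what changed: Replaces A's sentinel-append plus per-index lookahead (s[i], s[i+1] over range) with a run-based scan that jumps over each maximal run of equal characters, emitting the whole run for '1', a single '0' for a zero-run, and nothing otherwise.
import Mathlib
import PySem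

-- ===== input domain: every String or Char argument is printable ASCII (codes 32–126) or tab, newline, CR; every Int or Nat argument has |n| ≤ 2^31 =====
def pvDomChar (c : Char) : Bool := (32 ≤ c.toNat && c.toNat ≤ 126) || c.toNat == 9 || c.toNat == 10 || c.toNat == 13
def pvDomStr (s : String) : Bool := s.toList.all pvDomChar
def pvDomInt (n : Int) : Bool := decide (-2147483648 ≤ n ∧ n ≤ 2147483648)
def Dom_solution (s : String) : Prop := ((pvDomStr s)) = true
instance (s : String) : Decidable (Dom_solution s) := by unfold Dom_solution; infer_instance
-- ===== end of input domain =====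

-- B replaces A's '#'-sentinel + per-index lookahead loop with a run-based scan (alternative decomposition, same cost).

-- ===== PORT A =====
-- literal port of A: s += '#'; for i in range(len(s)-1): lookahead test; answer built left to right.
-- indices i and i+1 are always in range of t, so pyGetD is exact here.
def solution (s : String) : String :=
  let t := s.toList ++ ['#']
  let answer := (PySem.List.pyRange 0 ((t.length : Int) - 1) 1).foldl
    (fun acc i =>
      if PySem.List.pyGetD t i '#' = '0' ∧ PySem.List.pyGetD t (i + 1) '#' ≠ '0' then acc ++ ['0']
      else if PySem.List.pyGetD t i '#' = '1' then acc ++ ['1'] else acc) []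
  String.ofList answer

-- ===== PORT B =====
-- port of Source B: recursion on the list, each step consumes one maximal run of equal characters
-- (the inner while loop over j is the takeWhile/dropWhile split of the run).
def solutionAltGo : List Char → List Char
  | [] => []
  | c :: rest =>
    let run := rest.takeWhile (· == c)
    let rest' := rest.dropWhile (· == c)
    (if c = '1' then List.replicate (run.length + 1) '1'
     else if c = '0' then ['0'] else []) ++ solutionAltGo rest'
termination_by l => l.length
decreasing_by
  simp only [List.length_cons]
  exact Nat.lt_succ_of_le (List.dropWhile_sublist _ ).length_le

def solution_alt (s : String) : String := String.ofList (solutionAltGo s.toList)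

-- ===== PRECONDITION & SPEC =====
def Spec_solution (s : String) (out : String) : Prop := out = solution_alt s
instance (s : String) (out : String) : Decidable (Spec_solution s out) := by unfold Spec_solution; infer_instance

-- ===== CLAIM (what is proved, stated in full; the proofs are below) =====
def Claim_equal_solution : Prop := ∀ (s : String), Dom_solution s → Spec_solution s (solution s)

-- ===== LEMMAS AND PROOFS =====

-- what A emits for the pair (current char, next char)
def pvEmit (a b : Char) : List Char :=
  if a = '0' ∧ b ≠ '0' then ['0'] else if a = '1' then ['1'] else []

-- common recursive characterisation: process one char against the head of the rest (sentinel '#')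
def pvG : List Char → List Char
  | [] => []
  | a :: rest => pvEmit a (rest.headD '#') ++ pvG rest

lemma pvEmit_getD (cs : List Char) (a : Char) :
    pvEmit a ((cs ++ ['#']).getD 0 '#') = pvEmit a (cs.headD '#') := by
  cases cs <;> rfl

-- A's indexed loop, written as a flatMap over List.range, equals pvG
lemma range_flatMap_eq_pvG (cs : List Char) :
    (List.range cs.length).flatMap
      (fun k => pvEmit ((cs ++ ['#']).getD k '#') ((cs ++ ['#']).getD (k + 1) '#')) = pvG cs := by
  induction cs with
  | nil => rfl
  | cons a cs ih =>
    rw [List.length_cons, List.range_succ_eq_map]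
    simp only [List.flatMap_cons, List.flatMap_map, List.cons_append,
      List.getD_cons_zero, List.getD_cons_succ]
    rw [ih, pvG, pvEmit_getD]

lemma solution_eq_pvG (s : String) : solution s = String.ofList (pvG s.toList) := by
  unfold solution
  have hfun : (fun (acc : List Char) (i : Int) =>
      if PySem.List.pyGetD (s.toList ++ ['#']) i '#' = '0' ∧
          PySem.List.pyGetD (s.toList ++ ['#']) (i + 1) '#' ≠ '0' then acc ++ ['0']
      else if PySem.List.pyGetD (s.toList ++ ['#']) i '#' = '1' then acc ++ ['1'] else acc)
      = (fun acc i => acc ++ pvEmit (PySem.List.pyGetD (s.toList ++ ['#']) i '#')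
          (PySem.List.pyGetD (s.toList ++ ['#']) (i + 1) '#')) := by
    funext acc i
    unfold pvEmit
    split_ifs <;> simp
  simp only [hfun, PySem.List.foldl_append_eq_flatMap]
  have hlen : ((s.toList ++ ['#']).length : Int) - 1 = (s.toList.length : Nat) := by
    simp
  rw [hlen, PySem.List.pyRange_one]
  simp only [Int.sub_zero, Int.toNat_natCast, List.flatMap_map, Int.zero_add,
    List.nil_append]
  have : ∀ k : Nat, ((k : Int) + 1) = ((k + 1 : Nat) : Int) := by intro k; push_cast; ring
  simp only [PySem.List.pyGetD_natCast, this]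
  rw [range_flatMap_eq_pvG]

-- pvG on a '1': always emits '1', independent of the rest
lemma pvG_one (xs : List Char) : pvG ('1' :: xs) = '1' :: pvG xs := by
  rw [pvG]
  have : pvEmit '1' (xs.headD '#') = ['1'] := by
    unfold pvEmit
    split_ifs with h <;> simp_all
  rw [this]; rfl

-- pvG skips a char that is neither '0' nor '1'
lemma pvG_other (c : Char) (hc0 : c ≠ '0') (hc1 : c ≠ '1') (xs : List Char) :
    pvG (c :: xs) = pvG xs := by
  rw [pvG]
  have : pvEmit c (xs.headD '#') = [] := by
    unfold pvEmit; split_ifs with h <;> simp_all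
  rw [this]; rfl

-- a run of '1's of length m+1 emits m+1 ones
lemma pvG_ones_run (run rest : List Char) (hrun : ∀ x ∈ run, x = '1') :
    pvG ('1' :: (run ++ rest)) = List.replicate (run.length + 1) '1' ++ pvG rest := by
  induction run with
  | nil => simpa using pvG_one rest
  | cons x run ih =>
    have hx : x = '1' := hrun x (by simp)
    subst hx
    have hrun' : ∀ x ∈ run, x = '1' := fun x hx => hrun x (by simp [hx])
    rw [List.cons_append, pvG_one, ih hrun']
    simp [List.replicate_succ]

-- a run of '0's followed by a non-'0' head emits exactly one '0'
lemma pvG_zeros_run (run rest : List Char) (hrun : ∀ x ∈ run, x = '0')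
    (hrest : rest.headD '#' ≠ '0') :
    pvG ('0' :: (run ++ rest)) = '0' :: pvG rest := by
  induction run with
  | nil =>
    rw [List.nil_append, pvG]
    have : pvEmit '0' (rest.headD '#') = ['0'] := by
      unfold pvEmit; split_ifs with h <;> simp_all
    rw [this]; rfl
  | cons x run ih =>
    have hx : x = '0' := hrun x (by simp)
    subst hx
    have hrun' : ∀ x ∈ run, x = '0' := fun x hx => hrun x (by simp [hx])
    rw [List.cons_append, pvG]
    have : pvEmit '0' ((('0' :: (run ++ rest)) : List Char).headD '#') = [] := by
      unfold pvEmit; simp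
    rw [this, List.nil_append, ih hrun']

lemma head_dropWhile_zero (xs : List Char) :
    ((xs.dropWhile (· == '0')).headD '#') ≠ '0' := by
  cases hxs : xs.dropWhile (· == '0') with
  | nil => decide
  | cons y ys =>
    have := List.head?_dropWhile_not (· == '0') xs
    rw [hxs] at this
    simp_all

-- a run of chars that are neither '0' nor '1' is skipped entirely
lemma pvG_other_run (c : Char) (hc0 : c ≠ '0') (hc1 : c ≠ '1') (run rest : List Char)
    (hrun : ∀ x ∈ run, x = c) :
    pvG (c :: (run ++ rest)) = pvG rest := by
  induction run with
  | nil => simpa using pvG_other c hc0 hc1 rest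
  | cons x run ih =>
    have hx : x = c := hrun x (by simp)
    rw [hx, List.cons_append, pvG_other c hc0 hc1]
    exact ih (fun x hx => hrun x (by simp [hx]))

-- B's run recursion equals pvG
lemma solutionAltGo_eq_pvG (cs : List Char) : solutionAltGo cs = pvG cs := by
  induction cs using solutionAltGo.induct with
  | case1 => rw [solutionAltGo]; rfl
  | case2 c rest _run ih =>
    rw [solutionAltGo]
    have hsplit : rest.takeWhile (· == c) ++ rest.dropWhile (· == c) = rest :=
      List.takeWhile_append_dropWhile
    have hrun : ∀ x ∈ rest.takeWhile (· == c), x = c := by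
      intro x hx
      have := List.mem_takeWhile_imp hx
      simpa using this
    rw [ih]
    by_cases h1 : c = '1'
    · subst h1
      rw [if_pos rfl]
      conv_rhs => rw [← hsplit]
      rw [pvG_ones_run _ _ hrun]
    · by_cases h0 : c = '0'
      · subst h0
        rw [if_neg (by decide), if_pos rfl]
        conv_rhs => rw [← hsplit]
        rw [pvG_zeros_run _ _ hrun (head_dropWhile_zero rest)]
        rfl
      · rw [if_neg h1, if_neg h0, List.nil_append]
        conv_rhs => rw [← hsplit]
        rw [pvG_other_run c h0 h1 _ _ hrun]

-- ===== VERDICT (by name: the statement is the Claim_ definition above) =====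
theorem solution_spec : Claim_equal_solution := by
  intro s _
  unfold Spec_solution solution_alt
  rw [solution_eq_pvG, solutionAltGo_eq_pvG]
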